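-- pv_equiv track=rewrite | github.com/matthewdgreen/decipher | src/analysis/homophonic.py | _affected_windows
-- ===== SOURCE A (Python) =====
-- def _window_starts(text_len: int, order: int, step: int = 1) -> list[int]:
--     if text_len < order:
--         return []
--     max_start = text_len - order
--     starts = list(range(0, max_start + 1, max(1, step)))
--     return starts or [0]
--
-- def _affected_windows(
--     positions: list[int],
--     text_len: int,
--     order: int,
--     step: int = 1,
-- ) -> list[int]:
--     starts: set[int] = set()
--     valid_starts = _window_starts(text_len, order, step=step)
--     if not valid_starts:
--         return []
--     valid_start_set = set(valid_starts)
--     for pos in positions: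
--         lo = max(0, pos - order + 1)
--         hi = min(pos, valid_starts[-1])
--         for start in range(lo, hi + 1):
--             if start in valid_start_set:
--                 starts.add(start // max(1, step))
--     return sorted(starts)
-- ===== SOURCE B (Python) =====
-- def _affected_windows(positions, text_len, order, step=1):
--     if text_len < order:
--         return []
--     s = max(1, step)
--     last = ((text_len - order) // s) * s
--     out = set()
--     for pos in positions:
--         lo = max(0, pos - order + 1)
--         hi = min(pos, last)
--         out.update(range((lo + s - 1) // s, hi // s + 1))
--     return sorted(out)
-- ===== Notes on version B (the rewrite author's own statement) =====
-- stated objective: alternative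
-- what changed: B drops the precomputed valid-starts list and set entirely: instead of scanning every candidate start in [lo, hi] and testing membership in the set of valid window starts, B computes the affected window indices directly as an integer range from ceil(lo/s) to floor(hi/s) (s = max(1, step)) and adds that range to the result set.
import Mathlib
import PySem

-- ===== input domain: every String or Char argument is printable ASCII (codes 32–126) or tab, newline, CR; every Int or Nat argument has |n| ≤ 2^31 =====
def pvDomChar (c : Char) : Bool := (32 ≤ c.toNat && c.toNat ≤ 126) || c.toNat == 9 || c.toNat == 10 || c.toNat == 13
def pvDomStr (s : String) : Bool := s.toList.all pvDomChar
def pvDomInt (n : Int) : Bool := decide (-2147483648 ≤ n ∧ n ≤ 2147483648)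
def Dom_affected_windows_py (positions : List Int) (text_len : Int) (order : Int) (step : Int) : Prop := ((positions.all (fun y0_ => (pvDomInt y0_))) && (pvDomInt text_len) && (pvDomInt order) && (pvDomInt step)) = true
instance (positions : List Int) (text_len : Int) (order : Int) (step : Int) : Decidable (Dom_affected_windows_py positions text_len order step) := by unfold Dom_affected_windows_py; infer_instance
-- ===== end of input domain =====

-- B replaces A's per-position scan of every candidate start (with a membership test in
-- the precomputed set of valid window starts) by direct floor/ceil division arithmetic
-- that yields the range of affected window indices; same return value, no scan.

-- ===== PORT A =====
def window_starts_py (text_len : Int) (order : Int) (step : Int) : List Int :=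
  if text_len < order then []
  else
    let max_start := text_len - order
    let starts := PySem.List.pyRange 0 (max_start + 1) (max 1 step)
    if starts.isEmpty then [0] else starts

def affected_windows_py (positions : List Int) (text_len : Int) (order : Int) (step : Int) : List Int :=
  let valid_starts := window_starts_py text_len order step
  if valid_starts.isEmpty then []
  else
    let valid_start_set : PySem.Set Int := PySem.Set.ofList valid_starts
    let starts : PySem.Set Int :=
      positions.foldl (fun st pos =>
        let lo := max 0 (pos - order + 1)
        -- valid_starts[-1]: the list is guarded non-empty above, so the .getD 0 default is unreachable
        let hi := min pos ((PySem.List.pyGet? valid_starts (-1)).getD 0)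
        (PySem.List.pyRange lo (hi + 1) 1).foldl (fun st start =>
          if PySem.Set.contains valid_start_set start then
            PySem.Set.add st (PySem.Int.floordiv start (max 1 step))
          else st) st)
        PySem.Set.empty
    PySem.List.sorted starts (fun x => x) false

-- ===== PORT B =====
def affected_windows_py_alt (positions : List Int) (text_len : Int) (order : Int) (step : Int) : List Int :=
  if text_len < order then []
  else
    let s := max 1 step
    let last := PySem.Int.floordiv (text_len - order) s * s
    let out : PySem.Set Int :=
      positions.foldl (fun out pos =>
        let lo := max 0 (pos - order + 1)
        let hi := min pos last
        PySem.Set.update out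
          (PySem.List.pyRange (PySem.Int.floordiv (lo + s - 1) s) (PySem.Int.floordiv hi s + 1) 1))
        PySem.Set.empty
    PySem.List.sorted out (fun x => x) false

-- ===== PRECONDITION & SPEC =====
def Spec_affected_windows_py (positions : List Int) (text_len : Int) (order : Int) (step : Int) (out : List Int) : Prop := out = affected_windows_py_alt positions text_len order step
instance (positions : List Int) (text_len : Int) (order : Int) (step : Int) (out : List Int) : Decidable (Spec_affected_windows_py positions text_len order step out) := by unfold Spec_affected_windows_py; infer_instance

-- ===== CLAIM (what is proved, stated in full; the proofs are below) =====
def Claim_equal_affected_windows_py : Prop := ∀ (positions : List Int) (text_len : Int) (order : Int) (step : Int), Dom_affected_windows_py positions text_len order step → Spec_affected_windows_py positions text_len order step (affected_windows_py positions text_len order step)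

-- ===== LEMMAS AND PROOFS =====

lemma pv_mem_foldl {β : Type} (g : PySem.Set Int → β → PySem.Set Int) (P : β → Int → Prop)
    (h : ∀ st p x, x ∈ g st p ↔ x ∈ st ∨ P p x) :
    ∀ (l : List β) (init : PySem.Set Int) (x : Int),
      x ∈ l.foldl g init ↔ x ∈ init ∨ ∃ p ∈ l, P p x := by
  intro l
  induction l with
  | nil => simp
  | cons a t ih =>
    intro init x
    simp only [List.foldl_cons, ih, h, List.mem_cons]
    constructor
    · rintro ((h1 | h1) | ⟨p, hp, h2⟩)
      · exact Or.inl h1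
      · exact Or.inr ⟨a, Or.inl rfl, h1⟩
      · exact Or.inr ⟨p, Or.inr hp, h2⟩
    · rintro (h1 | ⟨p, (rfl | hp), h2⟩)
      · exact Or.inl (Or.inl h1)
      · exact Or.inl (Or.inr h2)
      · exact Or.inr ⟨p, hp, h2⟩

lemma pv_nodup_foldl {β : Type} (g : PySem.Set Int → β → PySem.Set Int)
    (h : ∀ st p, st.Nodup → (g st p).Nodup) :
    ∀ (l : List β) (init : PySem.Set Int), init.Nodup → (l.foldl g init).Nodup := by
  intro l
  induction l with
  | nil => intro init hi; simpa using hi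
  | cons a t ih => intro init hi; exact ih _ (h init a hi)

-- floordiv of an exact multiple
lemma pv_floordiv_mul_self {s c : Int} (hs : 0 < s) : PySem.Int.floordiv (s * c) s = c := by
  rw [PySem.Int.floordiv_eq_iff_of_pos hs]
  constructor <;> nlinarith

-- the last valid start
lemma pv_getLast_pyRange {M s : Int} (hs : 0 < s) (hM : 0 ≤ M) :
    (PySem.List.pyRange 0 (M + 1) s).getLast? = some (PySem.Int.floordiv M s * s) := by
  rw [PySem.List.pyRange_of_pos _ _ hs]
  have hlt : (0:Int) < M + 1 := by omega
  rw [if_pos hlt]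
  have hdiv : (M + 1 - 0 + s - 1) / s = M / s + 1 := by
    have : M + 1 - 0 + s - 1 = M + 1 * s := by ring
    rw [this, Int.add_mul_ediv_right _ _ (by omega)]
  rw [hdiv]
  have hq : 0 ≤ M / s := Int.ediv_nonneg hM (le_of_lt hs)
  have htn : (M / s + 1).toNat = (M / s).toNat + 1 := by omega
  rw [htn, List.range_succ, List.map_append]
  simp only [List.map_cons, List.map_nil, List.getLast?_concat]
  rw [PySem.Int.floordiv_eq_ediv_of_pos hs]
  congr 1
  rw [Int.toNat_of_nonneg hq]
  ring

-- membership in the multiples-of-s range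
lemma pv_mem_valid {M s x : Int} (hs : 0 < s) :
    x ∈ PySem.List.pyRange 0 (M + 1) s ↔ 0 ≤ x ∧ x ≤ M ∧ s ∣ x := by
  rw [PySem.List.mem_pyRange_iff_of_pos hs]
  simp only [sub_zero]
  omega

-- the arithmetic core: A's scanned-and-filtered window indices for one position are
-- exactly B's ceil/floor division range
lemma pv_core {M s lo hi x : Int} (hs : 0 < s)
    (hlo : 0 ≤ lo) (hhi : hi ≤ PySem.Int.floordiv M s * s) :
    (∃ start, start ∈ PySem.List.pyRange lo (hi + 1) 1 ∧
        start ∈ PySem.List.pyRange 0 (M + 1) s ∧ x = PySem.Int.floordiv start s) ↔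
      x ∈ PySem.List.pyRange (PySem.Int.floordiv (lo + s - 1) s)
            (PySem.Int.floordiv hi s + 1) 1 := by
  have hlastM : PySem.Int.floordiv M s * s ≤ M := by
    have h1 := PySem.Int.floordiv_mul_add_mod M s
    have h2 := PySem.Int.mod_nonneg M hs
    omega
  rw [PySem.List.mem_pyRange_one]
  constructor
  · rintro ⟨start, hmem1, hmem2, rfl⟩
    rw [PySem.List.mem_pyRange_one] at hmem1
    rw [pv_mem_valid hs] at hmem2
    obtain ⟨hmemlo, hmemhi⟩ := hmem1
    obtain ⟨-, -, c, rfl⟩ := hmem2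
    rw [pv_floordiv_mul_self hs]
    constructor
    · have : PySem.Int.floordiv (lo + s - 1) s < c + 1 := by
        rw [PySem.Int.floordiv_lt_iff_lt_mul hs]; nlinarith
      omega
    · have : c ≤ PySem.Int.floordiv hi s := by
        rw [PySem.Int.le_floordiv_iff_mul_le hs]; nlinarith
      omega
  · rintro ⟨h1, h2⟩
    refine ⟨s * x, ?_, ?_, (pv_floordiv_mul_self hs).symm⟩
    · rw [PySem.List.mem_pyRange_one]
      constructor
      · have : PySem.Int.floordiv (lo + s - 1) s < x + 1 := by omega
        rw [PySem.Int.floordiv_lt_iff_lt_mul hs] at this; nlinarith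
      · have : x ≤ PySem.Int.floordiv hi s := by omega
        rw [PySem.Int.le_floordiv_iff_mul_le hs] at this; nlinarith
    · rw [pv_mem_valid hs]
      have hsx : x ≤ PySem.Int.floordiv hi s := by omega
      rw [PySem.Int.le_floordiv_iff_mul_le hs] at hsx
      have hlosx : PySem.Int.floordiv (lo + s - 1) s < x + 1 := by omega
      rw [PySem.Int.floordiv_lt_iff_lt_mul hs] at hlosx
      refine ⟨by nlinarith, by nlinarith, ⟨x, rfl⟩⟩

-- ===== VERDICT (by name: the statement is the Claim_ definition above) =====
theorem affected_windows_py_spec : Claim_equal_affected_windows_py := by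
  intro positions text_len order step _
  unfold Spec_affected_windows_py affected_windows_py affected_windows_py_alt window_starts_py
  by_cases hlt : text_len < order
  · simp [hlt]
  · simp only [if_neg hlt]
    set s : Int := max 1 step with hs_def
    have hs : 0 < s := by omega
    set M : Int := text_len - order with hM_def
    have hM : 0 ≤ M := by omega
    set V : List Int := PySem.List.pyRange 0 (M + 1) s with hV_def
    have hne : V ≠ [] := by
      intro hnil
      have : (0:Int) ∈ V := by rw [hV_def, pv_mem_valid hs]; exact ⟨le_refl 0, hM, dvd_zero s⟩
      rw [hnil] at this; exact absurd this (List.not_mem_nil)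
    have hemp : V.isEmpty = false := by simpa [List.isEmpty_iff] using hne
    simp only [hemp, Bool.false_eq_true, if_false]
    set last : Int := PySem.Int.floordiv M s * s with hlast_def
    have hlast : (PySem.List.pyGet? V (-1)).getD 0 = last := by
      rw [hV_def, PySem.List.pyGet?_neg_one, pv_getLast_pyRange hs hM]; rfl
    -- one step of A's outer loop: the inner scan adds exactly the filtered quotients
    have hInner : ∀ (st : PySem.Set Int) (pos x : Int),
        (x ∈ (PySem.List.pyRange (max 0 (pos - order + 1))
              (min pos ((PySem.List.pyGet? V (-1)).getD 0) + 1) 1).foldl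
            (fun st start =>
              if PySem.Set.contains (PySem.Set.ofList V) start then
                PySem.Set.add st (PySem.Int.floordiv start s)
              else st) st) ↔
          x ∈ st ∨ ∃ start,
            start ∈ PySem.List.pyRange (max 0 (pos - order + 1)) (min pos last + 1) 1 ∧
            start ∈ V ∧ x = PySem.Int.floordiv start s := by
      intro st pos x
      rw [hlast]
      have hstep : ∀ (st2 : PySem.Set Int) (start y : Int),
          (y ∈ if PySem.Set.contains (PySem.Set.ofList V) start then
              PySem.Set.add st2 (PySem.Int.floordiv start s) else st2) ↔
            y ∈ st2 ∨ (start ∈ V ∧ y = PySem.Int.floordiv start s) := by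
        intro st2 start y
        by_cases hc : PySem.Set.contains (PySem.Set.ofList V) start = true
        · rw [if_pos hc, PySem.Set.mem_add]
          rw [PySem.Set.contains_iff, PySem.Set.mem_ofList] at hc
          tauto
        · rw [if_neg hc]
          rw [PySem.Set.contains_iff, PySem.Set.mem_ofList] at hc
          tauto
      rw [pv_mem_foldl _ (fun start y => start ∈ V ∧ y = PySem.Int.floordiv start s) hstep]
    -- membership in A's accumulated set
    have hmemA : ∀ x : Int,
        x ∈ positions.foldl (fun st pos =>
            (PySem.List.pyRange (max 0 (pos - order + 1))
                (min pos ((PySem.List.pyGet? V (-1)).getD 0) + 1) 1).foldl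
              (fun st start =>
                if PySem.Set.contains (PySem.Set.ofList V) start then
                  PySem.Set.add st (PySem.Int.floordiv start s)
                else st) st) PySem.Set.empty ↔
          ∃ pos ∈ positions, ∃ start,
            start ∈ PySem.List.pyRange (max 0 (pos - order + 1)) (min pos last + 1) 1 ∧
            start ∈ V ∧ x = PySem.Int.floordiv start s := by
      intro x
      rw [pv_mem_foldl _ (fun pos x => ∃ start,
          start ∈ PySem.List.pyRange (max 0 (pos - order + 1)) (min pos last + 1) 1 ∧
          start ∈ V ∧ x = PySem.Int.floordiv start s) hInner positions PySem.Set.empty x]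
      simp [PySem.Set.empty]
    -- membership in B's accumulated set
    have hmemB : ∀ x : Int,
        x ∈ positions.foldl (fun out pos =>
            PySem.Set.update out
              (PySem.List.pyRange (PySem.Int.floordiv (max 0 (pos - order + 1) + s - 1) s)
                (PySem.Int.floordiv (min pos last) s + 1) 1)) PySem.Set.empty ↔
          ∃ pos ∈ positions,
            x ∈ PySem.List.pyRange (PySem.Int.floordiv (max 0 (pos - order + 1) + s - 1) s)
              (PySem.Int.floordiv (min pos last) s + 1) 1 := by
      intro x
      rw [pv_mem_foldl _ (fun pos x =>
          x ∈ PySem.List.pyRange (PySem.Int.floordiv (max 0 (pos - order + 1) + s - 1) s)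
            (PySem.Int.floordiv (min pos last) s + 1) 1)
          (fun st p y => PySem.Set.mem_update st _ y) positions PySem.Set.empty x]
      simp [PySem.Set.empty]
    -- both accumulated sets are duplicate-free
    have hndA : (positions.foldl (fun st pos =>
        (PySem.List.pyRange (max 0 (pos - order + 1))
            (min pos ((PySem.List.pyGet? V (-1)).getD 0) + 1) 1).foldl
          (fun st start =>
            if PySem.Set.contains (PySem.Set.ofList V) start then
              PySem.Set.add st (PySem.Int.floordiv start s)
            else st) st) PySem.Set.empty).Nodup := by
      apply pv_nodup_foldl _ ?_ positions PySem.Set.empty List.nodup_nil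
      intro st p hnd
      apply pv_nodup_foldl _ ?_ _ st hnd
      intro st2 start h2
      split
      · exact PySem.Set.nodup_add st2 _ h2
      · exact h2
    have hndB : (positions.foldl (fun out pos =>
        PySem.Set.update out
          (PySem.List.pyRange (PySem.Int.floordiv (max 0 (pos - order + 1) + s - 1) s)
            (PySem.Int.floordiv (min pos last) s + 1) 1)) PySem.Set.empty).Nodup := by
      apply pv_nodup_foldl _ ?_ positions PySem.Set.empty List.nodup_nil
      intro st p hnd
      exact PySem.Set.nodup_update st _ hnd
    rw [PySem.List.sorted_id_eq_sorted_id_iff_perm,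
        List.perm_ext_iff_of_nodup hndA hndB]
    intro x
    rw [hmemA x, hmemB x]
    have hcore : ∀ pos : Int,
        (∃ start, start ∈ PySem.List.pyRange (max 0 (pos - order + 1)) (min pos last + 1) 1 ∧
            start ∈ V ∧ x = PySem.Int.floordiv start s) ↔
          x ∈ PySem.List.pyRange (PySem.Int.floordiv (max 0 (pos - order + 1) + s - 1) s)
            (PySem.Int.floordiv (min pos last) s + 1) 1 := by
      intro pos
      rw [hV_def]
      exact pv_core hs (by omega) (by rw [hlast_def] at *; omega)
    constructor
    · rintro ⟨pos, hp, hex⟩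
      exact ⟨pos, hp, (hcore pos).mp hex⟩
    · rintro ⟨pos, hp, hx⟩
      exact ⟨pos, hp, (hcore pos).mpr hx⟩
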